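-- pv_equiv track=rewrite | github.com/robertmoga/PythonDraw | PyDraw/dev/data_to_letters.py | get_boundaries_from_histogram
-- ===== SOURCE A (Python) =====
-- def get_boundaries_from_histogram(white_values):
--
--     boundaries = list()
--     index = -1
--
--     def trigger(pos, vec):
--         count = 0
--         for i in range(pos, len(vec) - 1):
--             if abs(vec[i] - vec[i + 1]) > 4:
--                 return count
--             count += 1
--
--         return -1
--
--     for i in range(len(white_values) - 1):
--         if index > -1 and i < index:
--             continue
--         val1 = white_values[i]
--         val2 = white_values[i + 1]
--         if i > 1:
--             val3 = white_values[i - 1]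
--
--         if (white_values[i] < 10 and white_values[i] > 0) and \
--                 (white_values[i + 1] < 10 and white_values[i + 1] > 0):
--             if abs(white_values[i] - white_values[i + 1]) < 10:
--
--                 count = trigger(i, white_values)
--                 if count != -1:
--                     boundaries.append(int(count / 2 + i))
--                     index = i + count
--
--     return boundaries
-- ===== SOURCE B (Python) =====
-- def get_boundaries_from_histogram(white_values):
--     # One backward pass precomputes the position of the next "jump" (|diff|>4),
--     # then a single forward while-loop skips directly past each detected run.
--     n = len(white_values)
--     boundaries = []
--     nxt = [None] * n  # nxt[i] = smallest j >= i with |v[j]-v[j+1]| > 4, or None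
--     for i in range(n - 2, -1, -1):
--         if abs(white_values[i] - white_values[i + 1]) > 4:
--             nxt[i] = i
--         else:
--             nxt[i] = nxt[i + 1]
--     i = 0
--     while i < n - 1:
--         if 0 < white_values[i] < 10 and 0 < white_values[i + 1] < 10:
--             j = nxt[i]
--             if j is not None:
--                 c = j - i
--                 boundaries.append(c // 2 + i)
--                 i = max(i + 1, i + c)
--                 continue
--         i += 1
--     return boundaries
-- ===== Notes on version B (the rewrite author's own statement) =====
-- stated objective: alternative
-- what changed: Replaced A's per-position forward rescan (trigger walks to the next jump from each candidate i) by a single backward pass precomputing the next-jump position for every index, and replaced the for-loop-with-continue skipping by a while loop that jumps directly past each detected run; same measured cost on random inputs.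
import Mathlib
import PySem

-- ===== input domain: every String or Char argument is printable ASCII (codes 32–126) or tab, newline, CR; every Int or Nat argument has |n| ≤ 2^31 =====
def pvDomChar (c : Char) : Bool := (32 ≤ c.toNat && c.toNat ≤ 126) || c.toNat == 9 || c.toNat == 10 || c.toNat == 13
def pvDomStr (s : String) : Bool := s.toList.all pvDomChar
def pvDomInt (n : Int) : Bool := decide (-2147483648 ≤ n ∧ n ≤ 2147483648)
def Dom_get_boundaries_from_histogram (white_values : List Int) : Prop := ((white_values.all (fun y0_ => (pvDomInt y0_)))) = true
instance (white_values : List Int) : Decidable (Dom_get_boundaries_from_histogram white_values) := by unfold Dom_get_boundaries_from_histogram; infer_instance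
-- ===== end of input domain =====

-- B replaces A's per-candidate forward rescan (`trigger` walks forward from each i) by one backward
-- pass precomputing the next-jump position plus a single forward skip loop (objective: alternative).

-- ===== PORT A =====
-- inner helper `trigger`: walk from i; return steps until first |v[j]-v[j+1]| > 4, else -1
def pvTrigGo (vec : List Int) (i : Nat) (count : Int) : Int :=
  if _h : i + 1 < vec.length then
    if (vec.getD i 0 - vec.getD (i + 1) 0).natAbs > 4 then count
    else pvTrigGo vec (i + 1) (count + 1)
  else -1
termination_by vec.length - i

def pvTrigger (pos : Nat) (vec : List Int) : Int := pvTrigGo vec pos 0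

-- the for-loop over range(len(wv)-1) with `continue` while i < index, as structural recursion on i
-- (indices i, i+1 are always in range here, so getD is exact; int(count/2 + i) with count ≥ 0
-- and small values equals floor division, ported as PySem.Int.floordiv)
def pvLoopA (wv : List Int) (i : Nat) (bs : List Int) (index : Int) : List Int :=
  if _h : i + 1 < wv.length then
    if index > -1 ∧ (i : Int) < index then pvLoopA wv (i + 1) bs index
    else
      let v1 := wv.getD i 0
      let v2 := wv.getD (i + 1) 0
      if (v1 < 10 ∧ v1 > 0) ∧ (v2 < 10 ∧ v2 > 0) then
        if (v1 - v2).natAbs < 10 then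
          let count := pvTrigger i wv
          if count ≠ -1 then
            pvLoopA wv (i + 1) (bs ++ [PySem.Int.floordiv count 2 + (i : Int)]) ((i : Int) + count)
          else pvLoopA wv (i + 1) bs index
        else pvLoopA wv (i + 1) bs index
      else pvLoopA wv (i + 1) bs index
  else bs
termination_by wv.length - i

def get_boundaries_from_histogram (white_values : List Int) : List Int :=
  pvLoopA white_values 0 [] (-1)

-- ===== PORT B =====
-- Source B's backward pass building nxt[i] = first j ≥ i with |v[j]-v[j+1]| > 4 (None if none);
-- pvMkNxt wv i is the suffix nxt[i:], so Source B's nxt is pvMkNxt wv 0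
def pvMkNxt (wv : List Int) (i : Nat) : List (Option Nat) :=
  if _h : i + 1 < wv.length then
    (if (wv.getD i 0 - wv.getD (i + 1) 0).natAbs > 4 then some i
     else (pvMkNxt wv (i + 1)).headD none) :: pvMkNxt wv (i + 1)
  else if i < wv.length then [none] else []
termination_by wv.length - i

-- Source B's while-loop; c = j - i is a Nat subtraction, exact since nxt guarantees j ≥ i
def pvLoopB (wv : List Int) (nxt : List (Option Nat)) (i : Nat) (bs : List Int) : List Int :=
  if _h : i + 1 < wv.length then
    let v1 := wv.getD i 0
    let v2 := wv.getD (i + 1) 0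
    if 0 < v1 ∧ v1 < 10 ∧ 0 < v2 ∧ v2 < 10 then
      match nxt.getD i none with
      | some j =>
          let c := j - i
          pvLoopB wv nxt (max (i + 1) (i + c)) (bs ++ [((c / 2 + i : Nat) : Int)])
      | none => pvLoopB wv nxt (i + 1) bs
    else pvLoopB wv nxt (i + 1) bs
  else bs
termination_by wv.length - i
decreasing_by all_goals omega

def get_boundaries_from_histogram_alt (white_values : List Int) : List Int :=
  pvLoopB white_values (pvMkNxt white_values 0) 0 []

-- ===== PRECONDITION & SPEC =====
def Spec_get_boundaries_from_histogram (white_values : List Int) (out : List Int) : Prop := out = get_boundaries_from_histogram_alt white_values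
instance (white_values : List Int) (out : List Int) : Decidable (Spec_get_boundaries_from_histogram white_values out) := by unfold Spec_get_boundaries_from_histogram; infer_instance

-- ===== CLAIM (what is proved, stated in full; the proofs are below) =====
def Claim_equal_get_boundaries_from_histogram : Prop := ∀ (white_values : List Int), Dom_get_boundaries_from_histogram white_values → Spec_get_boundaries_from_histogram white_values (get_boundaries_from_histogram white_values)

-- ===== LEMMAS AND PROOFS =====

-- indexing Source B's array at i = head of the suffix pvMkNxt wv i
lemma pvMkNxt_getD (wv : List Int) : ∀ k i, (pvMkNxt wv i).getD k none = (pvMkNxt wv (i + k)).headD none := by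
  intro k
  induction k with
  | zero =>
    intro i
    simp only [Nat.add_zero]
    cases pvMkNxt wv i <;> simp
  | succ k ih =>
    intro i
    rw [pvMkNxt]
    split
    · simp only [List.getD_cons_succ]
      rw [ih (i + 1), show i + 1 + k = i + (k + 1) from by omega]
    · rename_i h
      have h3 : ¬ (i + (k + 1)) + 1 < wv.length := by omega
      have h4 : ¬ (i + (k + 1)) < wv.length := by omega
      rw [pvMkNxt, dif_neg h3, if_neg h4]
      split <;> simp

-- any j reported by nxt satisfies i ≤ j
lemma pvMkNxt_head_ge (wv : List Int) : ∀ d i j, wv.length - i = d →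
    (pvMkNxt wv i).headD none = some j → i ≤ j := by
  intro d
  induction d with
  | zero =>
    intro i j hd h
    rw [pvMkNxt] at h
    have h1 : ¬ i + 1 < wv.length := by omega
    have h2 : ¬ i < wv.length := by omega
    rw [dif_neg h1, if_neg h2] at h
    simp at h
  | succ d ih =>
    intro i j hd h
    rw [pvMkNxt] at h
    by_cases h1 : i + 1 < wv.length
    · rw [dif_pos h1] at h
      simp only [List.headD_cons] at h
      split at h
      · cases h; omega
      · have := ih (i + 1) j (by omega) h
        omega
    · rw [dif_neg h1] at h
      split at h <;> simp at h

-- A's trigger computed from B's next-jump table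
lemma pvTrigGo_eq (wv : List Int) : ∀ d i count, wv.length - i = d →
    pvTrigGo wv i count =
      (match (pvMkNxt wv i).headD none with
       | some j => count + ((j : Int) - (i : Int))
       | none => -1) := by
  intro d
  induction d with
  | zero =>
    intro i count hd
    have h1 : ¬ i + 1 < wv.length := by omega
    have h2 : ¬ i < wv.length := by omega
    rw [pvTrigGo, dif_neg h1, pvMkNxt, dif_neg h1, if_neg h2]
    simp
  | succ d ih =>
    intro i count hd
    by_cases h1 : i + 1 < wv.length
    · rw [pvTrigGo, dif_pos h1, pvMkNxt, dif_pos h1]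
      by_cases hj : (wv.getD i 0 - wv.getD (i + 1) 0).natAbs > 4
      · rw [if_pos hj, if_pos hj]
        simp
      · rw [if_neg hj, if_neg hj]
        rw [ih (i + 1) (count + 1) (by omega)]
        simp only [List.headD_cons]
        cases hh : (pvMkNxt wv (i + 1)).headD none with
        | some j =>
          have hge := pvMkNxt_head_ge wv (wv.length - (i + 1)) (i + 1) j rfl hh
          push_cast
          ring_nf
        | none => rfl
    · have h2 : i < wv.length := by omega
      rw [pvTrigGo, dif_neg h1, pvMkNxt, dif_neg h1, if_pos h2]
      simp

-- A's skip phase: while i < index the loop does nothing, landing at index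
lemma pvLoopA_skip (wv : List Int) : ∀ d i bs (j : Nat), j - i = d → i ≤ j →
    pvLoopA wv i bs (j : Int) = pvLoopA wv j bs (j : Int) := by
  intro d
  induction d with
  | zero =>
    intro i bs j hd hij
    have : i = j := by omega
    subst this; rfl
  | succ d ih =>
    intro i bs j hd hij
    have hij' : i < j := by omega
    by_cases h1 : i + 1 < wv.length
    · rw [pvLoopA, dif_pos h1, if_pos ⟨by omega, by exact_mod_cast hij'⟩]
      exact ih (i + 1) bs j (by omega) (by omega)
    · rw [pvLoopA, dif_neg h1, pvLoopA, dif_neg (by omega : ¬ j + 1 < wv.length)]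

-- main invariant: with no skip pending (index ≤ i), A's loop equals B's loop
lemma pvLoop_eq (wv : List Int) : ∀ d i bs (idx : Int), wv.length - i ≤ d → idx ≤ (i : Int) →
    pvLoopA wv i bs idx = pvLoopB wv (pvMkNxt wv 0) i bs := by
  intro d
  induction d with
  | zero =>
    intro i bs idx hd _
    have h1 : ¬ i + 1 < wv.length := by omega
    rw [pvLoopA, dif_neg h1, pvLoopB, dif_neg h1]
  | succ d ih =>
    intro i bs idx hd hidx
    by_cases h1 : i + 1 < wv.length
    · rw [pvLoopA, dif_pos h1, pvLoopB, dif_pos h1,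
        if_neg (by omega)]
      set v1 := wv.getD i 0 with hv1
      set v2 := wv.getD (i + 1) 0 with hv2
      by_cases hC : 0 < v1 ∧ v1 < 10 ∧ 0 < v2 ∧ v2 < 10
      · rw [if_pos (by exact ⟨⟨hC.2.1, hC.1⟩, ⟨hC.2.2.2, hC.2.2.1⟩⟩), if_pos hC,
          if_pos (by omega : (v1 - v2).natAbs < 10)]
        rw [pvMkNxt_getD wv i 0]
        simp only [Nat.zero_add]
        have htr : pvTrigger i wv =
            (match (pvMkNxt wv i).headD none with
             | some j => 0 + ((j : Int) - (i : Int))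
             | none => -1) := pvTrigGo_eq wv (wv.length - i) i 0 rfl
        cases hh : (pvMkNxt wv i).headD none with
        | none =>
          rw [hh] at htr
          simp only [htr]
          rw [if_neg (by simp)]
          exact ih (i + 1) bs idx (by omega) (by push_cast; omega)
        | some j =>
          have hge := pvMkNxt_head_ge wv (wv.length - i) i j rfl hh
          rw [hh] at htr
          simp only [htr, zero_add]
          rw [if_pos (by omega : (j : Int) - (i : Int) ≠ -1)]
          have hcast : (j : Int) - (i : Int) = ((j - i : Nat) : Int) := by omega
          have hbs : bs ++ [PySem.Int.floordiv ((j : Int) - (i : Int)) 2 + (i : Int)]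
              = bs ++ [(((j - i) / 2 + i : Nat) : Int)] := by
            rw [hcast]
            congr 2
            rw [show (2 : Int) = ((2 : Nat) : Int) from rfl,
              PySem.Int.floordiv_natCast (j - i) 2]
            push_cast
            ring
          rw [hbs]
          by_cases hji : j < i + 1
          · -- j = i : no skip, both continue at i + 1
            have hji' : j = i := by omega
            have hmax : max (i + 1) (i + (j - i)) = i + 1 := by omega
            rw [hmax]
            have hidx' : (i : Int) + ((j : Int) - (i : Int)) ≤ ((i + 1 : Nat) : Int) := by
              push_cast; omega
            exact ih (i + 1) _ _ (by omega) hidx'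
          · -- j ≥ i + 1 : A skips forward to j, B jumps there directly
            have hij : (i : Int) + ((j : Int) - (i : Int)) = (j : Int) := by ring
            rw [hij]
            rw [pvLoopA_skip wv (j - (i + 1)) (i + 1) _ j rfl (by omega)]
            have hmax : max (i + 1) (i + (j - i)) = j := by omega
            rw [hmax]
            exact ih j _ _ (by omega) (by omega)
      · rw [if_neg (by tauto), if_neg hC]
        exact ih (i + 1) bs idx (by omega) (by push_cast; omega)
    · rw [pvLoopA, dif_neg h1, pvLoopB, dif_neg h1]

-- ===== VERDICT (by name: the statement is the Claim_ definition above) =====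
theorem get_boundaries_from_histogram_spec : Claim_equal_get_boundaries_from_histogram := by
  intro wv _
  unfold Spec_get_boundaries_from_histogram get_boundaries_from_histogram get_boundaries_from_histogram_alt
  exact pvLoop_eq wv wv.length 0 [] (-1) (by omega) (by norm_num)
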